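-- pv_equiv track=rewrite | github.com/mollnn/compiler-memento | lex.py | re_preprocess
-- ===== SOURCE A (Python) =====
-- import copy
--
-- def re_preprocess(re):
--     re = copy.deepcopy(re)
--     re = re.replace("[A~Za~z]", "([A~Z]|[a~z])")
--     re = re.replace("[A~Za~z0~9]", "([A~Z]|[a~z]|[0~9])")
--     re = re.replace("[0~9]", "(0|1|2|3|4|5|6|7|8|9)")
--     re = re.replace("[1~9]", "(1|2|3|4|5|6|7|8|9)")
--     re = re.replace(
--         "[A~Z]", "(A|B|C|D|E|F|G|H|I|J|K|L|M|N|O|P|Q|R|S|T|U|V|W|X|Y|Z)")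
--     re = re.replace(
--         "[a~z]", "(a|b|c|d|e|f|g|h|i|j|k|l|m|n|o|p|q|r|s|t|u|v|w|x|y|z)")
--
--     re = re.replace("\\n", "\n")
--     re = re.replace("\\r", "\r")
--     re = re.replace("\\t", "\t")
--
--     re = re.replace("\\&", "\x06")
--     re = re.replace("&", "\x01")
--     re = re.replace("\x06", "&")
--
--     re = re.replace("\\|", "\x06")
--     re = re.replace("|", "\x02")
--     re = re.replace("\x06", "|")
--
--     re = re.replace("\\*", "\x06")
--     re = re.replace("*", "\x03")
--     re = re.replace("\x06", "*")
--
--     re = re.replace("\\(", "\x06")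
--     re = re.replace("(", "\x04")
--     re = re.replace("\x06", "(")
--
--     re = re.replace("\\)", "\x06")
--     re = re.replace(")", "\x05")
--     re = re.replace("\x06", ")")
--
--     i = 0
--     while i+1 < len(re):
--         a = 'a' if re[i] not in "\x02\x01\x03\x04\x05" else re[i]
--         b = 'a' if re[i+1] not in "\x02\x01\x03\x04\x05" else re[i+1]
--         c = [
--             'a\x04', 'aa', '\x05a', '\x03a', '\x03\x04', '\x05\x04'
--         ]
--         if a+b in c:
--             re = re[:i+1]+'\x01'+re[i+1:]
--         i += 1
--     return re
-- ===== SOURCE B (Python) =====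
-- _RULES = [
--     ("[A~Za~z]", "([A~Z]|[a~z])"),
--     ("[A~Za~z0~9]", "([A~Z]|[a~z]|[0~9])"),
--     ("[0~9]", "(0|1|2|3|4|5|6|7|8|9)"),
--     ("[1~9]", "(1|2|3|4|5|6|7|8|9)"),
--     ("[A~Z]", "(A|B|C|D|E|F|G|H|I|J|K|L|M|N|O|P|Q|R|S|T|U|V|W|X|Y|Z)"),
--     ("[a~z]", "(a|b|c|d|e|f|g|h|i|j|k|l|m|n|o|p|q|r|s|t|u|v|w|x|y|z)"),
--     ("\\n", "\n"), ("\\r", "\r"), ("\\t", "\t"),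
--     ("\\&", "\x06"), ("&", "\x01"), ("\x06", "&"),
--     ("\\|", "\x06"), ("|", "\x02"), ("\x06", "|"),
--     ("\\*", "\x06"), ("*", "\x03"), ("\x06", "*"),
--     ("\\(", "\x06"), ("(", "\x04"), ("\x06", "("),
--     ("\\)", "\x06"), (")", "\x05"), ("\x06", ")"),
-- ]
--
--
-- def re_preprocess(re):
--     for old, new in _RULES:
--         re = re.replace(old, new)
--     if not re:
--         return re
--     # single pass: emit each char, inserting the concat marker \x01 between a
--     # pair (x, y) whenever x can end an operand and y can start one
--     out = []
--     for x, y in zip(re, re[1:]):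
--         out.append(x)
--         if x not in "\x01\x02\x04" and y not in "\x01\x02\x03\x05":
--             out.append("\x01")
--     out.append(re[-1])
--     return "".join(out)
-- ===== Notes on version B (the rewrite author's own statement) =====
-- stated objective: faster
-- what changed: B replaces A's O(n^2) while-loop that re-slices the whole string for every inserted concatenation marker with a single linear pass over adjacent character pairs that emits markers into an output buffer, and drives the replace chain from a rule table.
import Mathlib
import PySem

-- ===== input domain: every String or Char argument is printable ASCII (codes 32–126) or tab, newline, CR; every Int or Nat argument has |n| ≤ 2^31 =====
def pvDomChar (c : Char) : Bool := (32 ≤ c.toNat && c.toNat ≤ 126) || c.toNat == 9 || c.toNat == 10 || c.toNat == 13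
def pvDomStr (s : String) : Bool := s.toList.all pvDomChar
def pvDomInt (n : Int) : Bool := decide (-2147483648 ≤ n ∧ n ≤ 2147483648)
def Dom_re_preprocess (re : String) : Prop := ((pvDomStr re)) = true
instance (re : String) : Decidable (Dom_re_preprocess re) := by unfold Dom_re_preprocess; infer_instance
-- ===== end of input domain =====

-- B replaces A's quadratic insert-by-slicing loop with one linear pass over adjacent
-- pairs (and drives the replace chain from a rule table); same return value everywhere.

-- ===== PORT A =====
-- the operator string "\x02\x01\x03\x04\x05" of A
def pvOpsA : List Char := ['\x02', '\x01', '\x03', '\x04', '\x05']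
-- the list c of A
def pvCListA : List (List Char) :=
  [['a', '\x04'], ['a', 'a'], ['\x05', 'a'], ['\x03', 'a'], ['\x03', '\x04'], ['\x05', '\x04']]
-- the body test of A's while loop: a/b classification and 'a+b in c'
def pvCondA (x y : Char) : Bool :=
  let a := if pvOpsA.contains x then x else 'a'
  let b := if pvOpsA.contains y then y else 'a'
  pvCListA.contains [a, b]
-- A's while loop: i += 1 each round, re[:i+1]+'\x01'+re[i+1:] on a hit
-- (fuel only makes the recursion total; 2*len+1 rounds always suffice)
def pvLoopA : Nat → List Char → Nat → List Char
  | 0, s, _ => s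
  | fuel + 1, s, i =>
    if i + 1 < s.length then
      let x := s.getD i ' '
      let y := s.getD (i + 1) ' '
      let s' := if pvCondA x y then s.take (i + 1) ++ '\x01' :: s.drop (i + 1) else s
      pvLoopA fuel s' (i + 1)
    else s

def re_preprocess (re : String) : String :=
  let re := PySem.Str.replace re "[A~Za~z]" "([A~Z]|[a~z])"
  let re := PySem.Str.replace re "[A~Za~z0~9]" "([A~Z]|[a~z]|[0~9])"
  let re := PySem.Str.replace re "[0~9]" "(0|1|2|3|4|5|6|7|8|9)"
  let re := PySem.Str.replace re "[1~9]" "(1|2|3|4|5|6|7|8|9)"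
  let re := PySem.Str.replace re "[A~Z]" "(A|B|C|D|E|F|G|H|I|J|K|L|M|N|O|P|Q|R|S|T|U|V|W|X|Y|Z)"
  let re := PySem.Str.replace re "[a~z]" "(a|b|c|d|e|f|g|h|i|j|k|l|m|n|o|p|q|r|s|t|u|v|w|x|y|z)"
  let re := PySem.Str.replace re "\\n" "\n"
  let re := PySem.Str.replace re "\\r" "\r"
  let re := PySem.Str.replace re "\\t" "\t"
  let re := PySem.Str.replace re "\\&" "\x06"
  let re := PySem.Str.replace re "&" "\x01"
  let re := PySem.Str.replace re "\x06" "&"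
  let re := PySem.Str.replace re "\\|" "\x06"
  let re := PySem.Str.replace re "|" "\x02"
  let re := PySem.Str.replace re "\x06" "|"
  let re := PySem.Str.replace re "\\*" "\x06"
  let re := PySem.Str.replace re "*" "\x03"
  let re := PySem.Str.replace re "\x06" "*"
  let re := PySem.Str.replace re "\\(" "\x06"
  let re := PySem.Str.replace re "(" "\x04"
  let re := PySem.Str.replace re "\x06" "("
  let re := PySem.Str.replace re "\\)" "\x06"
  let re := PySem.Str.replace re ")" "\x05"
  let re := PySem.Str.replace re "\x06" ")"
  let cs := re.toList
  String.ofList (pvLoopA (2 * cs.length + 1) cs 0)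

-- ===== PORT B =====
-- B's rule table _RULES
def pvRules : List (String × String) :=
  [("[A~Za~z]", "([A~Z]|[a~z])"),
   ("[A~Za~z0~9]", "([A~Z]|[a~z]|[0~9])"),
   ("[0~9]", "(0|1|2|3|4|5|6|7|8|9)"),
   ("[1~9]", "(1|2|3|4|5|6|7|8|9)"),
   ("[A~Z]", "(A|B|C|D|E|F|G|H|I|J|K|L|M|N|O|P|Q|R|S|T|U|V|W|X|Y|Z)"),
   ("[a~z]", "(a|b|c|d|e|f|g|h|i|j|k|l|m|n|o|p|q|r|s|t|u|v|w|x|y|z)"),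
   ("\\n", "\n"), ("\\r", "\r"), ("\\t", "\t"),
   ("\\&", "\x06"), ("&", "\x01"), ("\x06", "&"),
   ("\\|", "\x06"), ("|", "\x02"), ("\x06", "|"),
   ("\\*", "\x06"), ("*", "\x03"), ("\x06", "*"),
   ("\\(", "\x06"), ("(", "\x04"), ("\x06", "("),
   ("\\)", "\x06"), (")", "\x05"), ("\x06", ")")]
-- B's pair test: x not in "\x01\x02\x04" and y not in "\x01\x02\x03\x05"
def pvNeedB (x y : Char) : Bool :=
  !(['\x01', '\x02', '\x04'].contains x) && !(['\x01', '\x02', '\x03', '\x05'].contains y)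
-- B's single pass over zip(re, re[1:]) appending x (and maybe the marker), last char kept
def pvConcatB : List Char → List Char
  | [] => []
  | [x] => [x]
  | x :: y :: t => x :: (if pvNeedB x y then ['\x01'] else []) ++ pvConcatB (y :: t)

def re_preprocess_alt (re : String) : String :=
  let re := pvRules.foldl (fun s p => PySem.Str.replace s p.1 p.2) re
  String.ofList (pvConcatB re.toList)

-- ===== PRECONDITION & SPEC =====
def Spec_re_preprocess (re : String) (out : String) : Prop := out = re_preprocess_alt re
instance (re : String) (out : String) : Decidable (Spec_re_preprocess re out) := by unfold Spec_re_preprocess; infer_instance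

-- ===== CLAIM (what is proved, stated in full; the proofs are below) =====
def Claim_equal_re_preprocess : Prop := ∀ (re : String), Dom_re_preprocess re → Spec_re_preprocess re (re_preprocess re)

-- ===== LEMMAS AND PROOFS =====

-- A's classify-then-lookup test coincides with B's two membership tests
lemma pvCondA_eq_pvNeedB (x y : Char) : pvCondA x y = pvNeedB x y := by
  by_cases hx : x ∈ pvOpsA <;> by_cases hy : y ∈ pvOpsA
  · fin_cases hx <;> fin_cases hy <;> decide
  · simp only [pvOpsA, List.mem_cons, List.not_mem_nil, or_false] at hy
    push Not at hy
    fin_cases hx <;>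
      simp [pvCondA, pvNeedB, pvOpsA, pvCListA, hy.1, hy.2.1, hy.2.2.1, hy.2.2.2.1, hy.2.2.2.2]
  · simp only [pvOpsA, List.mem_cons, List.not_mem_nil, or_false] at hx
    push Not at hx
    fin_cases hy <;>
      simp [pvCondA, pvNeedB, pvOpsA, pvCListA, hx.1, hx.2.1, hx.2.2.1, hx.2.2.2.1, hx.2.2.2.2]
  · simp only [pvOpsA, List.mem_cons, List.not_mem_nil, or_false] at hx hy
    push Not at hx; push Not at hy
    simp [pvCondA, pvNeedB, pvOpsA, pvCListA, hx.1, hx.2.1, hx.2.2.1, hx.2.2.2.1, hx.2.2.2.2,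
      hy.1, hy.2.1, hy.2.2.1, hy.2.2.2.1, hy.2.2.2.2]

lemma pvNeedB_marker (y : Char) : pvNeedB '\x01' y = false := by
  simp [pvNeedB]

-- A's loop, started at index pre.length of pre ++ rest, appends B's single pass over rest
lemma pvLoopA_eq (fuel : Nat) :
    ∀ (pre rest : List Char), 2 * rest.length ≤ fuel + 1 →
      pvLoopA fuel (pre ++ rest) pre.length = pre ++ pvConcatB rest := by
  induction fuel using Nat.strong_induction_on with
  | _ fuel ih =>
    intro pre rest hfuel
    match rest with
    | [] => cases fuel <;> simp [pvLoopA, pvConcatB]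
    | [x] => cases fuel <;> simp [pvLoopA, pvConcatB]
    | x :: y :: t =>
      simp only [List.length_cons] at hfuel
      obtain ⟨f, rfl⟩ : ∃ f, fuel = f + 1 := ⟨fuel - 1, by omega⟩
      have hguard : pre.length + 1 < (pre ++ x :: y :: t).length := by
        simp [List.length_append]
      have hx : (pre ++ x :: y :: t).getD pre.length ' ' = x := by
        simp
      have hy : (pre ++ x :: y :: t).getD (pre.length + 1) ' ' = y := by
        simp
      have htake : (pre ++ x :: y :: t).take (pre.length + 1) = pre ++ [x] := by
        simpa using List.take_length_add_append (l₁ := pre) (l₂ := x :: y :: t) 1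
      have hdrop : (pre ++ x :: y :: t).drop (pre.length + 1) = y :: t := by
        simp
      rw [pvLoopA, if_pos hguard]
      simp only [hx, hy, htake, hdrop]
      by_cases hc : pvCondA x y
      · -- insertion step; the very next round never inserts (the marker is an operator)
        obtain ⟨f', rfl⟩ : ∃ f', f = f' + 1 := ⟨f - 1, by omega⟩
        rw [if_pos hc]
        have hguard2 : pre.length + 1 + 1 < (pre ++ [x] ++ '\x01' :: y :: t).length := by
          simp [List.length_append]; omega
        have hx2 : (pre ++ [x] ++ '\x01' :: y :: t).getD (pre.length + 1) ' ' = '\x01' := by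
          simp
        have hy2 : (pre ++ [x] ++ '\x01' :: y :: t).getD (pre.length + 1 + 1) ' ' = y := by
          simp [Nat.add_assoc]
        rw [pvLoopA, if_pos hguard2]
        simp only [hx2, hy2, pvCondA_eq_pvNeedB, pvNeedB_marker, if_false, Bool.false_eq_true]
        have step : pre ++ [x] ++ '\x01' :: y :: t = (pre ++ [x, '\x01']) ++ (y :: t) := by simp
        have hlen2 : pre.length + 1 + 1 = (pre ++ [x, '\x01']).length := by simp
        rw [step, hlen2, ih f' (by omega) (pre ++ [x, '\x01']) (y :: t) (by simp; omega)]
        rw [pvCondA_eq_pvNeedB] at hc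
        simp [pvConcatB, hc]
      · rw [if_neg hc]
        have step : pre ++ x :: y :: t = (pre ++ [x]) ++ (y :: t) := by simp
        have hlen2 : pre.length + 1 = (pre ++ [x]).length := by simp
        rw [step, hlen2, ih f (by omega) (pre ++ [x]) (y :: t) (by simp; omega)]
        rw [pvCondA_eq_pvNeedB] at hc
        simp [pvConcatB, hc]

lemma pvLoopA_full (s : List Char) : pvLoopA (2 * s.length + 1) s 0 = pvConcatB s := by
  simpa using pvLoopA_eq (2 * s.length + 1) [] s (by omega)

set_option maxRecDepth 4096 in
lemma chains_eq (re : String) :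
    re_preprocess re = String.ofList (pvConcatB (pvRules.foldl (fun s p => PySem.Str.replace s p.1 p.2) re).toList) := by
  simp only [re_preprocess]
  rw [pvLoopA_full]
  simp only [pvRules, List.foldl_cons, List.foldl_nil]

-- ===== VERDICT (by name: the statement is the Claim_ definition above) =====
theorem re_preprocess_spec : Claim_equal_re_preprocess := by
  intro re _
  unfold Spec_re_preprocess re_preprocess_alt
  exact chains_eq re
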